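-- pv_equiv track=rewrite | github.com/wangdingyan/wcode | wcode/cycpep/data.py | generate_cyclic_permutations
-- ===== SOURCE A (Python) =====
-- def generate_cyclic_permutations(peptide, num_augments):
--
--
--     n = len(peptide)
--     if n <= 1:
--         raise ValueError("环肽序列的长度必须大于1")
--
--     if num_augments >= n:
--         raise ValueError(f"增强数量不能大于或等于环肽序列的长度 - 1, 当前最大值为 {n - 1}")
--
--     # augmentations = set()
--     augmentations = []
--
--     for i in range(1, n):
--
--         rotated_peptide = peptide[i:] + peptide[:i]
--         augmentations.append(rotated_peptide)
--
--         if len(augmentations) == num_augments: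
--             break
--
--     # 返回增强序列列表
--     return augmentations
-- ===== SOURCE B (Python) =====
-- def generate_cyclic_permutations(peptide, num_augments):
--     n = len(peptide)
--     if n <= 1:
--         raise ValueError("环肽序列的长度必须大于1")
--     if num_augments >= n:
--         raise ValueError(f"增强数量不能大于或等于环肽序列的长度 - 1, 当前最大值为 {n - 1}")
--     augmentations = []
--     current = peptide
--     while True:
--         current = current[1:] + current[0]
--         augmentations.append(current)
--         if len(augmentations) == num_augments or len(augmentations) == n - 1:
--             break
--     return augmentations
-- ===== Notes on version B (the rewrite author's own statement) =====
-- stated objective: alternative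
-- what changed: B threads each rotation from the previous one (current = current[1:] + current[0]) in a do-while loop whose stop condition is explicit (requested count reached, or all n-1 distinct rotations emitted), instead of A's indexed for-loop recomputing every rotation from the original as peptide[i:] + peptide[:i] with a break.
import Mathlib
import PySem

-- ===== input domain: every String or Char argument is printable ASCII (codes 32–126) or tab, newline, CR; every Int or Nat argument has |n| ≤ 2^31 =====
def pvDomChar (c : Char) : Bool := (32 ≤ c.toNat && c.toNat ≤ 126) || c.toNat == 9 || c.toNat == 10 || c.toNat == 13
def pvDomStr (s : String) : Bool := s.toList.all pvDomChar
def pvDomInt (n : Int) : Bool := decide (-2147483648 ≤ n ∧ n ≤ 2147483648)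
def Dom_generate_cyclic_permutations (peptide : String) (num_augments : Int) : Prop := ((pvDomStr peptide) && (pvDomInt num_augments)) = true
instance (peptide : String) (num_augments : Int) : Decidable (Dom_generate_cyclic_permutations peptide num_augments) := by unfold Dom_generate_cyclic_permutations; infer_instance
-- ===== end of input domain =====

-- B threads each rotation from the previous one in a do-while loop stopping at the requested count or after all n-1 rotations, instead of A's indexed for-loop recomputing each rotation from the original; equal return values proved on Pre_ (alternative decomposition, no speed claim).


-- ===== PORT A =====
-- rotated_peptide = peptide[i:] + peptide[:i]
def pvRotA (l : List Char) (i : Int) : List Char :=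
  PySem.List.slice l (some i) none ++ PySem.List.slice l none (some i)

-- A's for-loop with its append and conditional break
def pvLoopA (num_augments : Int) (l : List Char) : List Int → List String → List String
  | [], acc => acc
  | i :: rest, acc =>
    let acc' := acc ++ [String.ofList (pvRotA l i)]
    if (acc'.length : Int) = num_augments then acc' else pvLoopA num_augments l rest acc'

def generate_cyclic_permutations (peptide : String) (num_augments : Int) : List String :=
  pvLoopA num_augments peptide.toList
    (PySem.List.pyRange 1 (peptide.toList.length : Int) 1) []

-- ===== PORT B =====
-- while True: current = current[1:] + current[0]; append; break when len == num_augments or len == n-1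
-- (current[0] via pyGet?, none = Python's IndexError, unreachable under Pre_; the loop emits at most
--  nm1 = n-1 items, so fuel nm1 makes the recursion structural without changing any iteration)
def pvLoopB (num_augments : Int) (nm1 : Nat) : Nat → List Char → List String → List String
  | 0, _, out => out
  | fuel + 1, cur, out =>
    match PySem.List.pyGet? cur 0 with
    | none => out
    | some c =>
      let cur' := PySem.List.slice cur (some 1) none ++ [c]
      let out' := out ++ [String.ofList cur']
      if (out'.length : Int) = num_augments ∨ out'.length = nm1 then out'
      else pvLoopB num_augments nm1 fuel cur' out'

def generate_cyclic_permutations_alt (peptide : String) (num_augments : Int) : List String :=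
  let nm1 := peptide.toList.length - 1
  pvLoopB num_augments nm1 nm1 peptide.toList []

-- ===== PRECONDITION & SPEC =====
-- Pre_ excludes exactly the inputs on which A raises ValueError: len(peptide) ≤ 1 or num_augments ≥ len(peptide).
def Pre_generate_cyclic_permutations (peptide : String) (num_augments : Int) : Prop :=
  2 ≤ peptide.toList.length ∧ num_augments < (peptide.toList.length : Int)
instance (peptide : String) (num_augments : Int) : Decidable (Pre_generate_cyclic_permutations peptide num_augments) := by unfold Pre_generate_cyclic_permutations; infer_instance

def pvWitness_generate_cyclic_permutations : String × Int := ("ABCD", 2)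

def Spec_generate_cyclic_permutations (peptide : String) (num_augments : Int) (out : List String) : Prop := out = generate_cyclic_permutations_alt peptide num_augments
instance (peptide : String) (num_augments : Int) (out : List String) : Decidable (Spec_generate_cyclic_permutations peptide num_augments out) := by unfold Spec_generate_cyclic_permutations; infer_instance

-- ===== CLAIM (what is proved, stated in full; the proofs are below) =====
def Claim_equal_generate_cyclic_permutations : Prop := ∀ (peptide : String) (num_augments : Int), Dom_generate_cyclic_permutations peptide num_augments → Pre_generate_cyclic_permutations peptide num_augments → Spec_generate_cyclic_permutations peptide num_augments (generate_cyclic_permutations peptide num_augments)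

-- ===== LEMMAS AND PROOFS =====

-- A's loop unrolled: it maps pvRotA over a prefix of the index list.
lemma pvLoopA_eq (m : Int) (l : List Char) (idxs : List Int) (acc : List String) :
    pvLoopA m l idxs acc =
      acc ++ (idxs.take
        (if (acc.length : Int) < m ∧ m ≤ (acc.length : Int) + idxs.length
         then (m - acc.length).toNat else idxs.length)).map
        (fun i => String.ofList (pvRotA l i)) := by
  induction idxs generalizing acc with
  | nil => simp [pvLoopA]
  | cons i rest ih =>
    simp only [pvLoopA]
    by_cases hb : ((acc ++ [String.ofList (pvRotA l i)]).length : Int) = m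
    · rw [if_pos hb]
      simp only [List.length_append, List.length_cons, List.length_nil] at hb ⊢
      push_cast at hb
      split_ifs with h2
      · have h1 : (m - (acc.length : Int)).toNat = 1 := by omega
        rw [h1]
        simp
      · omega
    · rw [if_neg hb, ih]
      simp only [List.length_append, List.length_cons, List.length_nil] at hb ⊢
      push_cast at hb
      split_ifs with h1 h2 h2
      · have hT : (m - (acc.length : Int)).toNat = ((m - ((acc.length : Int) + 1)).toNat) + 1 := by
          push_cast at h1 h2; omega
        push_cast
        rw [hT, List.take_succ_cons]
        simp
      · push_cast at h1 h2; omega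
      · push_cast at h1 h2; omega
      · rw [List.take_length]
        simp [List.take_of_length_le]

-- the j-th cyclic rotation, as B's loop maintains it
def rotL (l : List Char) (j : Nat) : List Char := l.drop j ++ l.take j

-- one step of B's threading advances the rotation index
lemma rot_step (l : List Char) (j : Nat) (hj : j < l.length) :
    PySem.List.pyGet? (rotL l j) 0 = some l[j] ∧
    PySem.List.slice (rotL l j) (some 1) none ++ [l[j]] = rotL l (j + 1) := by
  constructor
  · rw [PySem.List.pyGet?_zero]
    unfold rotL
    rw [List.getElem?_append_left (by simp; omega), List.getElem?_drop]
    simp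
  · have h1 : (1 : Int) = ((1 : Nat) : Int) := rfl
    rw [h1, PySem.List.slice_from_natCast]
    unfold rotL
    rw [List.drop_append_of_le_length (by simp; omega), List.drop_drop,
        List.take_succ, List.getElem?_eq_getElem hj]
    simp

-- B's loop unrolled: starting from rotation j with j items emitted, it emits rotations j+1 … K,
-- where K is the unique stopping count characterised by hstop.
lemma pvLoopB_eq (l : List Char) (m : Int) (nm1 K : Nat) (hn : nm1 < l.length) (hKnm : K ≤ nm1)
    (hstop : ∀ i : Nat, 1 ≤ i → i ≤ K → (((i : Int) = m ∨ i = nm1) ↔ i = K)) :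
    ∀ (d j fuel : Nat) (out : List String), 1 ≤ d → out.length = j → j + d = K → d ≤ fuel →
    pvLoopB m nm1 fuel (rotL l j) out =
      out ++ (List.range d).map (fun t => String.ofList (rotL l (j + 1 + t))) := by
  intro d
  induction d with
  | zero => intro j fuel out hd; omega
  | succ d ih =>
    intro j fuel out _ hlen hjK hfuel
    have hj : j < l.length := by omega
    obtain ⟨hget, hrot⟩ := rot_step l j hj
    obtain ⟨fuel', rfl⟩ : ∃ f, fuel = f + 1 := ⟨fuel - 1, by omega⟩
    rw [pvLoopB, hget]
    simp only [hrot]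
    have hlen' : (out ++ [String.ofList (rotL l (j + 1))]).length = j + 1 := by simp [hlen]
    by_cases hstopNow : j + 1 = K
    · have hfire : ((j + 1 : Nat) : Int) = m ∨ j + 1 = nm1 := (hstop (j + 1) (by omega) (by omega)).mpr hstopNow
      rw [if_pos (by rw [hlen']; exact_mod_cast hfire)]
      have hd0 : d = 0 := by omega
      subst hd0
      simp [rotL]
    · have hnofire : ¬ (((j + 1 : Nat) : Int) = m ∨ j + 1 = nm1) := by
        intro h
        exact hstopNow ((hstop (j + 1) (by omega) (by omega)).mp h)
      rw [if_neg (by rw [hlen']; exact_mod_cast hnofire)]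
      rw [ih (j + 1) fuel' (out ++ [String.ofList (rotL l (j + 1))]) (by omega) hlen' (by omega) (by omega),
          List.range_succ_eq_map, List.map_cons, List.map_map, List.append_assoc,
          List.singleton_append]
      refine congrArg (out ++ ·) ?_
      refine List.cons_eq_cons.mpr ⟨?_, ?_⟩
      · simp
      · apply List.map_congr_left
        intro t _
        simp only [Function.comp_apply]
        have : j + 1 + 1 + t = j + 1 + (t + 1) := by omega
        rw [this]

-- pvRotA at a natural index is rotL
lemma rotA_eq_rotL (l : List Char) (j : Nat) :
    pvRotA l (j : Int) = rotL l j := by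
  unfold pvRotA rotL
  rw [PySem.List.slice_from_natCast, PySem.List.slice_to_natCast]

-- ===== VERDICT (by name: the statement is the Claim_ definition above) =====
theorem generate_cyclic_permutations_spec : Claim_equal_generate_cyclic_permutations := by
  intro peptide m hdom hpre
  unfold Spec_generate_cyclic_permutations
  unfold generate_cyclic_permutations generate_cyclic_permutations_alt
  generalize hl : peptide.toList = l
  unfold Pre_generate_cyclic_permutations at hpre
  rw [hl] at hpre
  obtain ⟨hn, hmn⟩ := hpre
  -- the common number of emitted rotations
  obtain ⟨K, hK⟩ : ∃ K : Nat, K = if 1 ≤ m then m.toNat else l.length - 1 := ⟨_, rfl⟩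
  have hK1 : 1 ≤ K := by rw [hK]; split <;> omega
  have hKnm : K ≤ l.length - 1 := by rw [hK]; split <;> omega
  -- A side
  rw [pvLoopA_eq]
  have hcond : ((([] : List String).length : Int) < m ∧
      m ≤ (([] : List String).length : Int) + (PySem.List.pyRange 1 (l.length : Int) 1).length) ↔ 1 ≤ m := by
    simp only [List.length_nil, Nat.cast_zero, PySem.List.length_pyRange_one]
    omega
  have hcount : (if (([] : List String).length : Int) < m ∧
      m ≤ (([] : List String).length : Int) + (PySem.List.pyRange 1 (l.length : Int) 1).length
      then (m - (([] : List String).length : Int)).toNat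
      else (PySem.List.pyRange 1 (l.length : Int) 1).length) = K := by
    rw [hK]
    by_cases h1 : 1 ≤ m
    · rw [if_pos (hcond.mpr h1), if_pos h1]; simp
    · rw [if_neg (fun h => h1 (hcond.mp h)), if_neg h1, PySem.List.length_pyRange_one]; omega
  rw [hcount]
  -- B side
  have hB := pvLoopB_eq l m (l.length - 1) K (by omega) hKnm
    (by
      intro i hi1 hiK
      rw [hK] at hiK ⊢
      by_cases h1 : 1 ≤ m
      · rw [if_pos h1] at hiK ⊢
        constructor
        · rintro (h | h) <;> omega
        · intro h; left; omega
      · rw [if_neg h1] at hiK ⊢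
        constructor
        · rintro (h | h) <;> omega
        · intro h; right; omega)
    K 0 (l.length - 1) [] hK1 rfl (by omega) hKnm
  rw [show rotL l 0 = l by simp [rotL]] at hB
  rw [hB]
  simp only [List.nil_append]
  -- both are maps over List.range K
  rw [PySem.List.pyRange_one, ← List.map_take, List.take_range, List.map_map]
  have hmin : min K ((l.length : Int) - 1).toNat = K := by omega
  rw [hmin]
  apply List.map_congr_left
  intro t _
  simp only [Function.comp_apply]
  have hc : (1 : Int) + (t : Int) = ((0 + 1 + t : Nat) : Int) := by push_cast; omega
  rw [hc, rotA_eq_rotL]
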